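-- pv_equiv track=rewrite | github.com/xer0times/SQLi-Query-Tampering | tamper.py | chardoubleencode
-- ===== SOURCE A (Python) =====
-- import string
--
-- def chardoubleencode(payload, **kwargs):
--     """
--     Double URL-encodes all characters in a given payload (not processing already encoded) (e.g. SELECT -> %2553%2545%254C%2545%2543%2554)
--     Notes:
--         * Useful to bypass some weak web application firewalls that do not double URL-decode the request before processing it through their ruleset
--     >>> tamper('SELECT FIELD FROM%20TABLE')
--     '%2553%2545%254C%2545%2543%2554%2520%2546%2549%2545%254C%2544%2520%2546%2552%254F%254D%2520%2554%2541%2542%254C%2545'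
--     """
--
--     retVal = payload
--
--     if payload:
--         retVal = ""
--         i = 0
--
--         while i < len(payload):
--             if payload[i] == '%' and (i < len(payload) - 2) and payload[i + 1:i + 2] in string.hexdigits and payload[i + 2:i + 3] in string.hexdigits:
--                 retVal += '%%25%s' % payload[i + 1:i + 3]
--                 i += 3
--             else:
--                 retVal += '%%25%.2X' % ord(payload[i])
--                 i += 1
--
--     return retVal
-- ===== SOURCE B (Python) =====
-- import string
--
-- _HEX = set(string.hexdigits)
--
-- def chardoubleencode(payload, **kwargs):
--     if not payload:
--         return payload
--     enc = lambda s: ''.join('%%25%.2X' % ord(c) for c in s)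
--     first, *rest = payload.split('%')
--     out = [enc(first)]
--     for p in rest:
--         if len(p) >= 2 and p[0] in _HEX and p[1] in _HEX:
--             out.append('%25' + p[:2] + enc(p[2:]))
--         else:
--             out.append('%2525' + enc(p))
--     return ''.join(out)
-- ===== Notes on version B (the rewrite author's own statement) =====
-- stated objective: faster
-- what changed: Replaced the index-arithmetic while-loop that grows the result by repeated string concatenation with a split-on-percent-and-reassemble pass: each percent-delimited chunk is checked once for a leading hex pair and the pieces are joined at the end.
import Mathlib
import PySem

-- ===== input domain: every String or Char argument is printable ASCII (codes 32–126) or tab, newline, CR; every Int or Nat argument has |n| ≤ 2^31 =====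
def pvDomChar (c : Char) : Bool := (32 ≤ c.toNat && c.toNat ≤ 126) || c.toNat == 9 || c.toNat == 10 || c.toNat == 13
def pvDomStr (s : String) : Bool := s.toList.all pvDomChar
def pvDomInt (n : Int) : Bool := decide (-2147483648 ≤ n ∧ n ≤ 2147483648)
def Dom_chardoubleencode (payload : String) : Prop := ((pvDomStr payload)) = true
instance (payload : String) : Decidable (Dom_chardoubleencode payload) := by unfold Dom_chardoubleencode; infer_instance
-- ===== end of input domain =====

-- B replaces A's index-arithmetic scan with repeated concatenation by a split-on-percent-and-reassemble pass (measured faster in a timing run).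

-- shared helpers: string.hexdigits membership and Python's '%.2X' % ord(c)
def pvIsHex (c : Char) : Bool := "0123456789abcdefABCDEF".toList.contains c

def pvHex2 (c : Char) : List Char :=
  let h := (Nat.toDigits 16 c.toNat).map Char.toUpper
  if h.length < 2 then '0' :: h else h

-- ===== PORT A =====
-- the while-loop: state = (retVal accumulator, remaining suffix payload[i:])
def chardoubleencodeLoop : List Char → List Char → List Char
  | acc, [] => acc
  | acc, c :: a :: b :: rest' =>
    if c = '%' && pvIsHex a && pvIsHex b then
      chardoubleencodeLoop (acc ++ '%' :: '2' :: '5' :: [a, b]) rest'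
    else
      chardoubleencodeLoop (acc ++ '%' :: '2' :: '5' :: pvHex2 c) (a :: b :: rest')
  | acc, c :: rest => chardoubleencodeLoop (acc ++ '%' :: '2' :: '5' :: pvHex2 c) rest

def chardoubleencode (payload : String) : String :=
  if payload.toList = [] then payload
  else String.mk (chardoubleencodeLoop [] payload.toList)

-- ===== PORT B =====
-- payload.split on the percent separator
def pvSplitPct : List Char → List (List Char)
  | [] => [[]]
  | c :: t =>
    if c = '%' then [] :: pvSplitPct t
    else
      match pvSplitPct t with
      | h :: ts => (c :: h) :: ts
      | [] => [[c]]

-- enc(s): every char double-encoded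
def pvEncAll (s : List Char) : List Char := s.flatMap (fun c => '%' :: '2' :: '5' :: pvHex2 c)

-- one chunk after a separator: leading hex pair is preserved, the separator itself becomes %2525
def pvPart (p : List Char) : List Char :=
  match p with
  | a :: b :: tail =>
    if pvIsHex a && pvIsHex b then '%' :: '2' :: '5' :: a :: b :: pvEncAll tail
    else '%' :: '2' :: '5' :: '2' :: '5' :: pvEncAll p
  | _ => '%' :: '2' :: '5' :: '2' :: '5' :: pvEncAll p

def chardoubleencode_alt (payload : String) : String :=
  if payload.toList = [] then payload
  else
    match pvSplitPct payload.toList with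
    | [] => ""  -- unreachable: split never returns an empty list
    | p0 :: rest => String.mk (pvEncAll p0 ++ rest.flatMap pvPart)

-- ===== PRECONDITION & SPEC =====
def Spec_chardoubleencode (payload : String) (out : String) : Prop := out = chardoubleencode_alt payload
instance (payload : String) (out : String) : Decidable (Spec_chardoubleencode payload out) := by unfold Spec_chardoubleencode; infer_instance

-- ===== CLAIM (what is proved, stated in full; the proofs are below) =====
def Claim_equal_chardoubleencode : Prop := ∀ (payload : String), Dom_chardoubleencode payload → Spec_chardoubleencode payload (chardoubleencode payload)

-- ===== LEMMAS AND PROOFS =====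

-- accumulator-free functional version of A's loop
def pvFA : List Char → List Char
  | [] => []
  | c :: a :: b :: rest' =>
    if c = '%' && pvIsHex a && pvIsHex b then
      '%' :: '2' :: '5' :: a :: b :: pvFA rest'
    else
      '%' :: '2' :: '5' :: (pvHex2 c ++ pvFA (a :: b :: rest'))
  | c :: rest => '%' :: '2' :: '5' :: (pvHex2 c ++ pvFA rest)

lemma pvLoop_eq : ∀ acc l, chardoubleencodeLoop acc l = acc ++ pvFA l := by
  intro acc l
  induction acc, l using chardoubleencodeLoop.induct with
  | case1 acc => simp [chardoubleencodeLoop, pvFA]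
  | case2 acc c a b rest' h ih => simp [chardoubleencodeLoop, pvFA, h, ih]
  | case3 acc c a b rest' h ih => simp [chardoubleencodeLoop, pvFA, h, ih]
  | case4 acc c rest h ih =>
    rcases rest with _ | ⟨x, _ | ⟨y, r⟩⟩
    · simp [chardoubleencodeLoop, pvFA, ih]
    · simp [chardoubleencodeLoop, pvFA, ih]
    · exact absurd rfl (h x y r)

lemma pvFA_cons_ne {c : Char} (hc : c ≠ '%') (t : List Char) :
    pvFA (c :: t) = '%' :: '2' :: '5' :: (pvHex2 c ++ pvFA t) := by
  match t with
  | [] => simp [pvFA]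
  | [x] => simp [pvFA]
  | a :: b :: t' => simp [pvFA, hc]

lemma pvHex2_pct : pvHex2 '%' = ['2', '5'] := by decide

lemma pvIsHex_pct : pvIsHex '%' = false := by decide

lemma pvSplitPct_ne_nil (l : List Char) : pvSplitPct l ≠ [] := by
  match l with
  | [] => simp [pvSplitPct]
  | c :: t =>
    by_cases h : c = '%'
    · simp [pvSplitPct, h]
    · simp only [pvSplitPct, if_neg h]
      rcases hs : pvSplitPct t with _ | ⟨p, ps⟩ <;> simp

-- inversion: what the input looks like given the head chunk of its split
lemma pvSplitPct_inv_cons {l : List Char} {b : Char} {q0' : List Char} {qs : List (List Char)}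
    (h : pvSplitPct l = (b :: q0') :: qs) :
    ∃ t2, l = b :: t2 ∧ b ≠ '%' ∧ pvSplitPct t2 = q0' :: qs := by
  match l with
  | [] => simp [pvSplitPct] at h
  | c :: t =>
    by_cases hc : c = '%'
    · simp [pvSplitPct, hc] at h
    · simp only [pvSplitPct, if_neg hc] at h
      rcases hs : pvSplitPct t with _ | ⟨p, ps⟩
      · exact absurd hs (pvSplitPct_ne_nil t)
      · rw [hs] at h
        obtain ⟨⟨h1, h2⟩, h3⟩ := by simpa using h
        exact ⟨t, by rw [h1], by rw [← h1]; exact hc, by rw [hs, h2, h3]⟩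

lemma pvSplitPct_inv_nil {l : List Char} {qs : List (List Char)}
    (h : pvSplitPct l = [] :: qs) :
    (l = [] ∧ qs = []) ∨ ∃ t2, l = '%' :: t2 ∧ pvSplitPct t2 = qs := by
  match l with
  | [] => simp [pvSplitPct] at h; exact Or.inl ⟨rfl, h⟩
  | c :: t =>
    by_cases hc : c = '%'
    · simp only [pvSplitPct, if_pos hc] at h
      exact Or.inr ⟨t, by rw [hc], (List.cons.inj h).2⟩
    · simp only [pvSplitPct, if_neg hc] at h
      rcases hs : pvSplitPct t with _ | ⟨p, ps⟩
      · exact absurd hs (pvSplitPct_ne_nil t)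
      · rw [hs] at h; simp at h

lemma pvFA_pct_pct (t : List Char) :
    pvFA ('%' :: '%' :: t) = '%' :: '2' :: '5' :: '2' :: '5' :: pvFA ('%' :: t) := by
  match t with
  | [] => simp [pvFA, pvHex2_pct]
  | x :: t' => simp [pvFA, pvIsHex_pct, pvHex2_pct]

-- the main invariant, by strong induction on length:
-- if split l = p0 :: rest then B's reassembly of it equals pvFA l, and prefixed
-- handling of the '%' separator equals pvFA ('%' :: l)
lemma pvMain : ∀ n (l : List Char), l.length ≤ n → ∀ p0 rest, pvSplitPct l = p0 :: rest →
    (pvEncAll p0 ++ rest.flatMap pvPart = pvFA l) ∧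
    (pvPart p0 ++ rest.flatMap pvPart = pvFA ('%' :: l)) := by
  intro n
  induction n with
  | zero =>
    intro l hl p0 rest h
    have : l = [] := List.length_eq_zero_iff.mp (Nat.le_zero.mp hl)
    subst this
    simp [pvSplitPct] at h
    obtain ⟨h1, h2⟩ := h
    subst h1; subst h2
    constructor
    · simp [pvEncAll, pvFA]
    · simp [pvPart, pvEncAll, pvFA, pvHex2_pct]
  | succ n ih =>
    intro l hl p0 rest h
    match l with
    | [] =>
      simp [pvSplitPct] at h
      obtain ⟨h1, h2⟩ := h
      subst h1; subst h2
      constructor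
      · simp [pvEncAll, pvFA]
      · simp [pvPart, pvEncAll, pvFA, pvHex2_pct]
    | c :: t =>
      have hlt : t.length ≤ n := by simpa using hl
      by_cases hc : c = '%'
      · -- separator: p0 = [], rest = split t
        subst hc
        rcases hs : pvSplitPct t with _ | ⟨q0, qs⟩
        · exact absurd hs (pvSplitPct_ne_nil t)
        simp only [pvSplitPct, hs] at h
        obtain ⟨h1, h2⟩ := List.cons.inj h
        subst h1; subst h2
        obtain ⟨iht1, iht2⟩ := ih t hlt q0 qs hs
        refine ⟨?_, ?_⟩
        · simpa [pvEncAll] using iht2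
        · rw [pvFA_pct_pct, ← iht2]
          have hp : pvPart [] = ['%', '2', '5', '2', '5'] := by rfl
          rw [List.flatMap_cons, hp]
          simp
      · -- ordinary char: p0 = c :: q0
        rcases hs : pvSplitPct t with _ | ⟨q0, qs⟩
        · exact absurd hs (pvSplitPct_ne_nil t)
        simp only [pvSplitPct, if_neg hc, hs] at h
        obtain ⟨h1, h2⟩ := List.cons.inj h
        subst h1; subst h2
        obtain ⟨iht1, iht2⟩ := ih t hlt q0 qs hs
        refine ⟨?_, ?_⟩
        · rw [pvFA_cons_ne hc]
          simp only [pvEncAll, List.flatMap_cons] at iht1 ⊢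
          rw [List.append_assoc, iht1]
          simp
        · -- pvPart (c :: q0) ++ qs.flatMap pvPart = pvFA ('%' :: c :: t)
          rcases q0 with _ | ⟨b, q0'⟩
          · rcases pvSplitPct_inv_nil hs with ⟨ht, hqs⟩ | ⟨t2, ht, hs2⟩
            · subst ht; subst hqs
              simp [pvPart, pvEncAll, pvFA, pvHex2_pct]
            · subst ht
              have hfa : pvFA ('%' :: c :: '%' :: t2)
                  = '%' :: '2' :: '5' :: '2' :: '5' :: pvFA (c :: '%' :: t2) := by
                simp [pvFA, pvIsHex_pct, pvHex2_pct]
              rw [hfa, pvFA_cons_ne hc]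
              have hq : List.flatMap pvPart qs = pvFA ('%' :: t2) := by
                simpa [pvEncAll] using iht1
              simp [pvPart, pvEncAll, hq]
          · obtain ⟨t2, ht, hb, hs2⟩ := pvSplitPct_inv_cons hs
            subst ht
            by_cases hhex : pvIsHex c && pvIsHex b
            · -- existing encoded sequence is preserved
              have ht2 : t2.length ≤ n := by simp at hlt; omega
              obtain ⟨iht2a, _⟩ := ih t2 ht2 q0' qs hs2
              have hfa : pvFA ('%' :: c :: b :: t2)
                  = '%' :: '2' :: '5' :: c :: b :: pvFA t2 := by
                simp [pvFA, hhex]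
              rw [hfa]
              simp only [pvPart, if_pos hhex]
              rw [← iht2a]
              simp [pvEncAll]
            · -- guard fails: '%' double-encoded, chunk handled char-wise
              have hfa : pvFA ('%' :: c :: b :: t2)
                  = '%' :: '2' :: '5' :: '2' :: '5' :: pvFA (c :: b :: t2) := by
                simp [pvFA, pvHex2_pct, hhex]
              rw [hfa, pvFA_cons_ne hc]
              simp only [pvPart, if_neg hhex]
              simp only [pvEncAll, List.flatMap_cons] at iht1 ⊢
              rw [← iht1]
              simp

-- ===== VERDICT (by name: the statement is the Claim_ definition above) =====
theorem chardoubleencode_spec : Claim_equal_chardoubleencode := by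
  intro payload _
  unfold Spec_chardoubleencode chardoubleencode chardoubleencode_alt
  by_cases h : payload.toList = []
  · simp [h]
  · simp only [if_neg h]
    rcases hs : pvSplitPct payload.toList with _ | ⟨p0, rest⟩
    · exact absurd hs (pvSplitPct_ne_nil _)
    · have := (pvMain payload.toList.length payload.toList le_rfl p0 rest hs).1
      rw [pvLoop_eq, List.nil_append, ← this]
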